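-- pv_equiv track=rewrite | github.com/EddieKHHo/simMutAccumTE | simMutAccumTE.py | numEligibleDeletions
-- ===== SOURCE A (Python) =====
-- def isNested(chrm, start, stop, ID, bedEntries, L):
--     for x in bedEntries:
--         if ID != x[3] and chrm==x[0] and x[1]-L < start and stop < x[2]+L:
--             return 1
--         if ID != x[3] and chrm==x[0] and x[1]-L < start and start < x[2]+L:
--             return 1
--         if ID != x[3] and chrm==x[0] and x[1]-L < stop and stop < x[2]+L:
--             return 1
--     return 0
--
-- def containsNested(chrm, start, stop, ID, bedEntries, L):
--     for x in bedEntries: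
--         if ID != x[3] and chrm==x[0] and start-L < x[1] and x[2] < stop+L:
--             return 1
--     return 0
--
-- def numEligibleDeletions(mnLen, mxLen, rLen, bedEntries):
-- 	#####-----loop through each TE
-- 	count=0
-- 	for x in bedEntries:
-- 		LEN = x[2] - x[1]
-- 		nestedTE = containsNested(x[0],x[1],x[2],x[3],bedEntries,rLen)
-- 		overlapTE = isNested(x[0],x[1],x[2],x[3],bedEntries,rLen)
-- 		if mxLen > LEN >= mnLen and nestedTE == 0 and overlapTE == 0:
-- 			count+=1
-- 	return count
-- ===== SOURCE B (Python) =====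
-- # Per-chromosome sorted index with prefix "top-2 distinct-ID max" states and binary
-- # search: each TE's conflict tests become three O(log n) queries instead of two list scans.
--
-- def _count_less(us, t):
--     # index of first element >= t in a sorted list (hand-rolled bisect_left)
--     lo, hi = 0, len(us)
--     while lo < hi:
--         mid = (lo + hi) // 2
--         if us[mid] < t:
--             lo = mid + 1
--         else:
--             hi = mid
--     return lo
--
-- def _push(st, v, i):
--     # st = (best, sec): best = (max v, its ID, first attained); sec = max v among IDs != best ID
--     b1, b2 = st
--     if b1 is None:
--         return ((v, i), None)
--     v1, i1 = b1
--     if v > v1: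
--         return ((v, i), (v1 if i != i1 else b2))
--     if i != i1 and (b2 is None or v > b2):
--         return (b1, v)
--     return st
--
-- def _build(entries):
--     # entries: list of (u, v, ID); returns sorted u-keys and prefix top-2 states
--     entries = sorted(entries, key=lambda e: e[0])
--     us = [e[0] for e in entries]
--     states = [(None, None)]
--     st = (None, None)
--     for (u, v, i) in entries:
--         st = _push(st, v, i)
--         states.append(st)
--     return (us, states)
--
-- def _query(idx, t, bound, q):
--     # is there an entry with u < t, v > bound and ID != q ?
--     us, states = idx
--     b1, b2 = states[_count_less(us, t)]
--     if b1 is None: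
--         return False
--     v1, i1 = b1
--     if i1 != q:
--         return v1 > bound
--     return b2 is not None and b2 > bound
--
-- def numEligibleDeletions(mnLen, mxLen, rLen, bedEntries):
--     groups = {}
--     for (c, a, b, i) in bedEntries:
--         groups.setdefault(c, []).append((a, b, i))
--     fwd = {}
--     rev = {}
--     for c in groups:
--         g = groups[c]
--         fwd[c] = _build(g)
--         rev[c] = _build([(-u, -v, i) for (u, v, i) in g])
--     count = 0
--     for (c, a, b, i) in bedEntries:
--         if mnLen <= b - a < mxLen:
--             if not (_query(fwd[c], a + rLen, min(a, b) - rLen, i)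
--                     or _query(fwd[c], b + rLen, b - rLen, i)
--                     or _query(rev[c], rLen - a, -b - rLen, i)):
--                 count += 1
--     return count
-- ===== Notes on version B (the rewrite author's own statement) =====
-- stated objective: faster
-- what changed: B merges A's seven pairwise inequalities into three half-plane queries (max stop among entries with start below a threshold, excluding the query's ID) and answers each by binary search over a per-chromosome start-sorted index carrying prefix top-2 distinct-ID maxima, replacing A's two full-list scans per TE.
import Mathlib
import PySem

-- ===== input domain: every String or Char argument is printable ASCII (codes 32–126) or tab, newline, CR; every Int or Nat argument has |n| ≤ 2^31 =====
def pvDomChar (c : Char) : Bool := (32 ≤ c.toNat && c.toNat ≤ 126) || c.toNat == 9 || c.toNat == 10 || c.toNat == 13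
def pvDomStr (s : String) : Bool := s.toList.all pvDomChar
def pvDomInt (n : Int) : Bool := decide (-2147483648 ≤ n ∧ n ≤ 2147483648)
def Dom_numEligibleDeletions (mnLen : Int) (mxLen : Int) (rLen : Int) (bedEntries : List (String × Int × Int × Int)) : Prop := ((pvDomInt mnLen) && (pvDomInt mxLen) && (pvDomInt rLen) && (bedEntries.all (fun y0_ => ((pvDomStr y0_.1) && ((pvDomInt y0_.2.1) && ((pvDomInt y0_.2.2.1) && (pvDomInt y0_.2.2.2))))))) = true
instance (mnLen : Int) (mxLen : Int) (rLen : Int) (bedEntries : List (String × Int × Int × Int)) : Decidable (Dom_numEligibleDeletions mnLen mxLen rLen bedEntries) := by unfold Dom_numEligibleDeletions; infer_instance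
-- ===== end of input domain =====

-- B replaces A's two whole-list scans per TE by three binary-search queries against a
-- per-chromosome start-sorted index with prefix top-2 distinct-ID maxima (O(n log n) vs O(n^2)).

-- ===== PORT A =====
def isNestedA (chrm : String) (start stop ID : Int)
    (bedEntries : List (String × Int × Int × Int)) (L : Int) : Int :=
  match bedEntries with
  | [] => 0
  | x :: rest =>
    if ID ≠ x.2.2.2 ∧ chrm = x.1 ∧ x.2.1 - L < start ∧ stop < x.2.2.1 + L then 1
    else if ID ≠ x.2.2.2 ∧ chrm = x.1 ∧ x.2.1 - L < start ∧ start < x.2.2.1 + L then 1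
    else if ID ≠ x.2.2.2 ∧ chrm = x.1 ∧ x.2.1 - L < stop ∧ stop < x.2.2.1 + L then 1
    else isNestedA chrm start stop ID rest L

def containsNestedA (chrm : String) (start stop ID : Int)
    (bedEntries : List (String × Int × Int × Int)) (L : Int) : Int :=
  match bedEntries with
  | [] => 0
  | x :: rest =>
    if ID ≠ x.2.2.2 ∧ chrm = x.1 ∧ start - L < x.2.1 ∧ x.2.2.1 < stop + L then 1
    else containsNestedA chrm start stop ID rest L

def numEligibleDeletions (mnLen : Int) (mxLen : Int) (rLen : Int)
    (bedEntries : List (String × Int × Int × Int)) : Int :=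
  bedEntries.foldl (fun count x =>
    let LEN := x.2.2.1 - x.2.1
    let nestedTE := containsNestedA x.1 x.2.1 x.2.2.1 x.2.2.2 bedEntries rLen
    let overlapTE := isNestedA x.1 x.2.1 x.2.2.1 x.2.2.2 bedEntries rLen
    if mxLen > LEN ∧ LEN ≥ mnLen ∧ nestedTE = 0 ∧ overlapTE = 0 then count + 1 else count) 0

-- ===== PORT B =====
-- state of _push: (best (max v, its ID), max v among IDs ≠ best ID)
abbrev PvSt := Option (Int × Int) × Option Int

-- _count_less: hand-rolled bisect_left loop; us[mid] is in range whenever read (lo < hi ≤ len)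
def pvCountLessAux (us : List Int) (t : Int) (lo hi : Nat) : Nat :=
  if h : lo < hi then
    let mid := (lo + hi) / 2
    if us.getD mid 0 < t then pvCountLessAux us t (mid + 1) hi
    else pvCountLessAux us t lo mid
  else lo
termination_by hi - lo
decreasing_by all_goals omega

def pvCountLess (us : List Int) (t : Int) : Nat := pvCountLessAux us t 0 us.length

def pvPush (st : PvSt) (v i : Int) : PvSt :=
  match st with
  | (none, _) => (some (v, i), none)
  | (some (v1, i1), b2) =>
    if v > v1 then (some (v, i), if i ≠ i1 then some v1 else b2)
    else if i ≠ i1 ∧ (match b2 with | none => true | some w => decide (v > w)) = true then (some (v1, i1), some v)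
    else (some (v1, i1), b2)

def pvBuild (entries : List (Int × Int × Int)) : List Int × List PvSt :=
  let es := PySem.List.sorted entries (fun e => e.1) false
  let us := es.map (fun e => e.1)
  let p := es.foldl (fun (p : PvSt × List PvSt) e =>
      let st' := pvPush p.1 e.2.1 e.2.2
      (st', p.2 ++ [st'])) ((none, none), [(none, none)])
  (us, p.2)

def pvQuery (idx : List Int × List PvSt) (t bound q : Int) : Bool :=
  let st := idx.2.getD (pvCountLess idx.1 t) (none, none)
  match st with
  | (none, _) => false
  | (some (v1, i1), b2) =>
    if i1 ≠ q then decide (v1 > bound)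
    else match b2 with
         | none => false
         | some w => decide (w > bound)

def numEligibleDeletions_alt (mnLen : Int) (mxLen : Int) (rLen : Int)
    (bedEntries : List (String × Int × Int × Int)) : Int :=
  let groups := bedEntries.foldl
    (fun d x => d.modify x.1 [] (· ++ [(x.2.1, x.2.2.1, x.2.2.2)])) (PySem.Dict.empty)
  let fr := groups.keys.foldl
    (fun (p : PySem.Dict String (List Int × List PvSt) × PySem.Dict String (List Int × List PvSt)) c =>
      (p.1.insert c (pvBuild (groups.getD c [])),
       p.2.insert c (pvBuild ((groups.getD c []).map (fun e => (-e.1, -e.2.1, e.2.2))))))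
    (PySem.Dict.empty, PySem.Dict.empty)
  bedEntries.foldl (fun count x =>
    if mnLen ≤ x.2.2.1 - x.2.1 ∧ x.2.2.1 - x.2.1 < mxLen then
      if ¬ ((pvQuery (fr.1.getD x.1 ([], [])) (x.2.1 + rLen) (min x.2.1 x.2.2.1 - rLen) x.2.2.2
           || pvQuery (fr.1.getD x.1 ([], [])) (x.2.2.1 + rLen) (x.2.2.1 - rLen) x.2.2.2
           || pvQuery (fr.2.getD x.1 ([], [])) (rLen - x.2.1) (-x.2.2.1 - rLen) x.2.2.2) = true)
      then count + 1 else count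
    else count) 0

-- ===== PRECONDITION & SPEC =====
def Spec_numEligibleDeletions (mnLen : Int) (mxLen : Int) (rLen : Int) (bedEntries : List (String × Int × Int × Int)) (out : Int) : Prop := out = numEligibleDeletions_alt mnLen mxLen rLen bedEntries
instance (mnLen : Int) (mxLen : Int) (rLen : Int) (bedEntries : List (String × Int × Int × Int)) (out : Int) : Decidable (Spec_numEligibleDeletions mnLen mxLen rLen bedEntries out) := by unfold Spec_numEligibleDeletions; infer_instance

-- ===== CLAIM (what is proved, stated in full; the proofs are below) =====
def Claim_equal_numEligibleDeletions : Prop := ∀ (mnLen : Int) (mxLen : Int) (rLen : Int) (bedEntries : List (String × Int × Int × Int)), Dom_numEligibleDeletions mnLen mxLen rLen bedEntries → Spec_numEligibleDeletions mnLen mxLen rLen bedEntries (numEligibleDeletions mnLen mxLen rLen bedEntries)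

-- ===== LEMMAS AND PROOFS =====

theorem pvIndicator (b : Bool) : ((if b = true then (1 : Int) else 0) = 0) ↔ b = false := by
  cases b <;> simp

-- A's isNested is the indicator of a disjunction over the list
theorem isNestedA_char (chrm : String) (start stop ID L : Int)
    (bed : List (String × Int × Int × Int)) :
    isNestedA chrm start stop ID bed L =
      (if bed.any (fun x => decide (ID ≠ x.2.2.2 ∧ chrm = x.1 ∧
          ((x.2.1 - L < start ∧ stop < x.2.2.1 + L) ∨
           (x.2.1 - L < start ∧ start < x.2.2.1 + L) ∨
           (x.2.1 - L < stop ∧ stop < x.2.2.1 + L)))) then 1 else 0) := by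
  induction bed with
  | nil => simp [isNestedA]
  | cons x rest ih =>
    rw [isNestedA, ih]
    simp only [List.any_cons, Bool.or_eq_true, decide_eq_true_eq]
    by_cases h1 : ID ≠ x.2.2.2 ∧ chrm = x.1 ∧ x.2.1 - L < start ∧ stop < x.2.2.1 + L
    · rw [if_pos h1, if_pos (Or.inl (by tauto))]
    · rw [if_neg h1]
      by_cases h2 : ID ≠ x.2.2.2 ∧ chrm = x.1 ∧ x.2.1 - L < start ∧ start < x.2.2.1 + L
      · rw [if_pos h2, if_pos (Or.inl (by tauto))]
      · rw [if_neg h2]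
        by_cases h3 : ID ≠ x.2.2.2 ∧ chrm = x.1 ∧ x.2.1 - L < stop ∧ stop < x.2.2.1 + L
        · rw [if_pos h3, if_pos (Or.inl (by tauto))]
        · rw [if_neg h3]
          congr 1
          simp only [eq_iff_iff]
          constructor
          · exact Or.inr
          · rintro (hh | hh)
            · exact absurd hh (by tauto)
            · exact hh

theorem containsNestedA_char (chrm : String) (start stop ID L : Int)
    (bed : List (String × Int × Int × Int)) :
    containsNestedA chrm start stop ID bed L =
      (if bed.any (fun x => decide (ID ≠ x.2.2.2 ∧ chrm = x.1 ∧
          start - L < x.2.1 ∧ x.2.2.1 < stop + L)) then 1 else 0) := by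
  induction bed with
  | nil => simp [containsNestedA]
  | cons x rest ih =>
    rw [containsNestedA, ih]
    simp only [List.any_cons, Bool.or_eq_true, decide_eq_true_eq]
    by_cases h : ID ≠ x.2.2.2 ∧ chrm = x.1 ∧ start - L < x.2.1 ∧ x.2.2.1 < stop + L
    · rw [if_pos h, if_pos (Or.inl h)]
    · rw [if_neg h]
      congr 1
      simp only [eq_iff_iff]
      exact (or_iff_right h).symm

-- the grouping dict looked up at c is the same-chromosome triples
theorem groups_getD (bed : List (String × Int × Int × Int)) (c : String) :
    (bed.foldl (fun d x => d.modify x.1 [] (· ++ [(x.2.1, x.2.2.1, x.2.2.2)])) PySem.Dict.empty).getD c [] =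
      (bed.filter (fun y => y.1 == c)).map (fun x => (x.2.1, x.2.2.1, x.2.2.2)) := by
  have h := PySem.Dict.getD_foldl_modify_append
    (l := bed.map (fun x => (x.1, (x.2.1, x.2.2.1, x.2.2.2))))
    (d := (PySem.Dict.empty : PySem.Dict String _)) (c := c)
  rw [List.foldl_map] at h
  rw [h]
  simp

-- binary search returns the number of elements below t (sorted input)
theorem pvCountLess_eq_countP (us : List Int) (t : Int)
    (hs : us.Pairwise (· ≤ ·)) :
    pvCountLess us t = us.countP (fun u => decide (u < t)) := by
  have base : ∀ (k : Nat), k ≤ us.length →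
      (∀ (j : Nat) (hj : j < us.length), j < k → us[j] < t) →
      (∀ (j : Nat) (hj : j < us.length), k ≤ j → ¬ us[j] < t) →
      us.countP (fun u => decide (u < t)) = k := by
    intro k hk h1 h2
    have hsplit : us = us.take k ++ us.drop k := (List.take_append_drop k us).symm
    rw [hsplit, List.countP_append]
    have hct : (us.take k).countP (fun u => decide (u < t)) = k := by
      have hall : ∀ a ∈ us.take k, (decide (a < t)) = true := by
        intro a ha
        obtain ⟨j, hj, rfl⟩ := List.mem_iff_getElem.mp ha
        have hjk : j < k := by
          have := hj; simp [List.length_take] at this; omega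
        have hjl : j < us.length := by
          have := hj; simp [List.length_take] at this; omega
        rw [List.getElem_take]
        exact decide_eq_true (h1 j hjl hjk)
      rw [List.countP_eq_length.mpr hall, List.length_take]
      omega
    have hcd : (us.drop k).countP (fun u => decide (u < t)) = 0 := by
      apply List.countP_eq_zero.mpr
      intro a ha
      obtain ⟨j, hj, rfl⟩ := List.mem_iff_getElem.mp ha
      have hjl : k + j < us.length := by
        have := hj; simp [List.length_drop] at this; omega
      rw [List.getElem_drop]
      simpa using h2 (k + j) hjl (by omega)
    omega
  have main : ∀ (n lo hi : Nat), hi - lo ≤ n → lo ≤ hi → hi ≤ us.length →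
      (∀ (j : Nat) (hj : j < us.length), j < lo → us[j] < t) →
      (∀ (j : Nat) (hj : j < us.length), hi ≤ j → ¬ us[j] < t) →
      pvCountLessAux us t lo hi = us.countP (fun u => decide (u < t)) := by
    intro n
    induction n with
    | zero =>
      intro lo hi hn hle hhi h1 h2
      have : lo = hi := by omega
      subst this
      rw [pvCountLessAux]
      simp only [lt_irrefl, dite_false]
      exact (base lo hhi h1 h2).symm
    | succ n ih =>
      intro lo hi hn hle hhi h1 h2
      rw [pvCountLessAux]
      by_cases hlh : lo < hi
      · rw [dif_pos hlh]
        simp only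
        have hmid1 : (lo + hi) / 2 < hi := by omega
        have hmid0 : lo ≤ (lo + hi) / 2 := by omega
        have hmlen : (lo + hi) / 2 < us.length := by omega
        rw [List.getD_eq_getElem us 0 hmlen]
        by_cases hm : us[(lo + hi) / 2] < t
        · rw [if_pos hm]
          apply ih ((lo + hi) / 2 + 1) hi (by omega) (by omega) hhi
          · intro j hj hjlt
            rcases Nat.lt_or_ge j ((lo + hi) / 2) with h | h
            · calc us[j] ≤ us[(lo + hi) / 2] :=
                    List.pairwise_iff_getElem.mp hs j ((lo + hi) / 2) hj hmlen h
                _ < t := hm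
            · have : j = (lo + hi) / 2 := by omega
              subst this; exact hm
          · exact h2
        · rw [if_neg hm]
          apply ih lo ((lo + hi) / 2) (by omega) (by omega) (by omega) h1
          intro j hj hjge hcon
          rcases Nat.lt_or_ge ((lo + hi) / 2) j with h | h
          · exact hm (lt_of_le_of_lt
              (List.pairwise_iff_getElem.mp hs ((lo + hi) / 2) j hmlen hj h) hcon)
          · have : j = (lo + hi) / 2 := by omega
            subst this; exact hm hcon
      · rw [dif_neg hlh]
        have : lo = hi := by omega
        subst this
        exact (base lo hhi h1 h2).symm
  exact main us.length 0 us.length (by omega) (by omega) (by omega)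
    (by intro j hj hcon; omega) (by intro j hj hge hcon; omega)

-- the fold state over a processed list
def pvFoldSt (l : List (Int × Int × Int)) : PvSt :=
  l.foldl (fun st e => pvPush st e.2.1 e.2.2) (none, none)

-- invariant of the top-2 distinct-ID maximum state
def PvInv (l : List (Int × Int × Int)) (st : PvSt) : Prop :=
  match st with
  | (none, _) => l = []
  | (some (v1, i1), b2) =>
      (∃ e ∈ l, e.2.1 = v1 ∧ e.2.2 = i1) ∧ (∀ e ∈ l, e.2.1 ≤ v1) ∧
      (match b2 with
       | none => ∀ e ∈ l, e.2.2 = i1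
       | some w => (∃ e ∈ l, e.2.2 ≠ i1 ∧ e.2.1 = w) ∧ (∀ e ∈ l, e.2.2 ≠ i1 → e.2.1 ≤ w))

theorem pvInv_step (l : List (Int × Int × Int)) (st : PvSt) (e : Int × Int × Int)
    (h : PvInv l st) : PvInv (l ++ [e]) (pvPush st e.2.1 e.2.2) := by
  obtain ⟨b1, b2⟩ := st
  match b1 with
  | none =>
    have hl : l = [] := h
    subst hl
    simp [pvPush, PvInv]
  | some (v1, i1) =>
    obtain ⟨⟨e1, he1, he1v, he1i⟩, hmax, hsec⟩ := h
    simp only [pvPush]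
    by_cases hv : e.2.1 > v1
    · rw [if_pos hv]
      by_cases hi : e.2.2 ≠ i1
      · rw [if_pos hi]
        refine ⟨⟨e, by simp, rfl, rfl⟩, ?_, ⟨e1, by simp [he1],
            by rw [he1i]; exact fun hc => hi hc.symm, he1v⟩, ?_⟩
        · intro f hf
          rcases List.mem_append.mp hf with hf | hf
          · exact le_of_lt (lt_of_le_of_lt (hmax f hf) hv)
          · simp at hf; subst hf; exact le_refl _
        · intro f hf hfi
          rcases List.mem_append.mp hf with hf | hf
          · exact hmax f hf
          · simp at hf; subst hf; exact absurd rfl hfi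
      · rw [if_neg hi]
        have hi2 : e.2.2 = i1 := not_ne_iff.mp hi
        refine ⟨⟨e, by simp, rfl, rfl⟩, ?_, ?_⟩
        · intro f hf
          rcases List.mem_append.mp hf with hf | hf
          · exact le_of_lt (lt_of_le_of_lt (hmax f hf) hv)
          · simp at hf; subst hf; exact le_refl _
        · match b2 with
          | none =>
            intro f hf
            rcases List.mem_append.mp hf with hf | hf
            · have := hsec f hf; omega
            · simp at hf; subst hf; rfl
          | some w =>
            obtain ⟨⟨f1, hf1, hf1i, hf1v⟩, hwmax⟩ := hsec
            refine ⟨⟨f1, by simp [hf1], by omega, hf1v⟩, ?_⟩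
            intro f hf hfi
            rcases List.mem_append.mp hf with hf | hf
            · exact hwmax f hf (by omega)
            · simp at hf; subst hf; exact absurd rfl hfi
    · rw [if_neg hv]
      split_ifs with hg
      · 
        refine ⟨⟨e1, by simp [he1], he1v, he1i⟩, ?_, ⟨e, by simp, hg.1, rfl⟩, ?_⟩
        · intro f hf
          rcases List.mem_append.mp hf with hf | hf
          · exact hmax f hf
          · simp at hf; subst hf; omega
        · intro f hf hfi
          rcases List.mem_append.mp hf with hf | hf
          · match b2 with
            | none => exact absurd (hsec f hf) hfi
            | some w =>
              have hw : e.2.1 > w := by simpa using hg.2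
              exact le_of_lt (lt_of_le_of_lt (hsec.2 f hf hfi) hw)
          · simp at hf; subst hf; exact le_refl _
      · refine ⟨⟨e1, by simp [he1], he1v, he1i⟩, ?_, ?_⟩
        · intro f hf
          rcases List.mem_append.mp hf with hf | hf
          · exact hmax f hf
          · simp at hf; subst hf; omega
        · match b2 with
          | none =>
            intro f hf
            rcases List.mem_append.mp hf with hf | hf
            · exact hsec f hf
            · simp at hf; subst hf
              by_contra hne
              exact hg ⟨hne, by simp⟩
          | some w =>
            obtain ⟨⟨f1, hf1, hf1i, hf1v⟩, hwmax⟩ := hsec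
            refine ⟨⟨f1, by simp [hf1], hf1i, hf1v⟩, ?_⟩
            intro f hf hfi
            rcases List.mem_append.mp hf with hf | hf
            · exact hwmax f hf hfi
            · simp at hf; subst hf
              by_contra hlt
              exact hg ⟨hfi, by simp; omega⟩

theorem pvInv_foldSt (l : List (Int × Int × Int)) : PvInv l (pvFoldSt l) := by
  induction l using List.reverseRecOn with
  | nil => simp [pvFoldSt, PvInv]
  | append_singleton l e ih =>
    have : pvFoldSt (l ++ [e]) = pvPush (pvFoldSt l) e.2.1 e.2.2 := by
      simp [pvFoldSt, List.foldl_append]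
    rw [this]
    exact pvInv_step l (pvFoldSt l) e ih

-- the decision pvQuery takes once it holds the state (proof-side copy of the match)
def pvQDec (st : PvSt) (bound q : Int) : Bool :=
  match st with
  | (none, _) => false
  | (some (v1, i1), b2) =>
    if i1 ≠ q then decide (v1 > bound)
    else match b2 with
         | none => false
         | some w => decide (w > bound)

theorem pvQuery_eq_qdec (idx : List Int × List PvSt) (t bound q : Int) :
    pvQuery idx t bound q = pvQDec (idx.2.getD (pvCountLess idx.1 t) (none, none)) bound q := rfl

-- query decision from the state is the existential over the processed list
theorem pvQuery_state (l : List (Int × Int × Int)) (st : PvSt) (bound q : Int)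
    (h : PvInv l st) :
    pvQDec st bound q = true ↔
      ∃ e ∈ l, e.2.2 ≠ q ∧ e.2.1 > bound := by
  obtain ⟨b1, b2⟩ := st
  match b1 with
  | none =>
    have hl : l = [] := h
    subst hl; simp [pvQDec]
  | some (v1, i1) =>
    obtain ⟨⟨e1, he1, he1v, he1i⟩, hmax, hsec⟩ := h
    simp only [pvQDec]
    by_cases hq : i1 ≠ q
    · rw [if_pos hq]
      simp only [decide_eq_true_eq]
      constructor
      · intro hgt; exact ⟨e1, he1, by omega, by omega⟩
      · rintro ⟨f, hf, hfi, hfv⟩; exact lt_of_le_of_lt' (hmax f hf) hfv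
    · rw [if_neg hq]
      have hq2 : i1 = q := not_ne_iff.mp hq
      match b2 with
      | none =>
        simp only [Bool.false_eq_true, false_iff]
        rintro ⟨f, hf, hfi, hfv⟩
        exact hfi (by rw [hsec f hf, hq2])
      | some w =>
        obtain ⟨⟨f1, hf1, hf1i, hf1v⟩, hwmax⟩ := hsec
        simp only [decide_eq_true_eq]
        constructor
        · intro hw; exact ⟨f1, hf1, by omega, by omega⟩
        · rintro ⟨f, hf, hfi, hfv⟩
          exact lt_of_le_of_lt' (hwmax f hf (by omega)) hfv

-- the fold of _build produces the final state and the prefix-fold states list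
theorem pvBuild_scan (es : List (Int × Int × Int)) :
    (es.foldl (fun (p : PvSt × List PvSt) e =>
      let st' := pvPush p.1 e.2.1 e.2.2
      (st', p.2 ++ [st'])) ((none, none), [(none, none)])) =
      (pvFoldSt es, (List.range (es.length + 1)).map (fun k => pvFoldSt (es.take k))) := by
  induction es using List.reverseRecOn with
  | nil => simp [pvFoldSt]
  | append_singleton es e ih =>
    rw [List.foldl_append, ih]
    simp only [List.foldl_cons, List.foldl_nil]
    have h1 : pvFoldSt (es ++ [e]) = pvPush (pvFoldSt es) e.2.1 e.2.2 := by
      simp [pvFoldSt, List.foldl_append]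
    have hlen : (es ++ [e]).length + 1 = (es.length + 1) + 1 := by simp
    conv_rhs => rw [hlen, List.range_succ, List.map_append]
    refine Prod.ext (by simp [h1]) ?_
    show List.map (fun k => pvFoldSt (List.take k es)) (List.range (es.length + 1)) ++
        [pvPush (pvFoldSt es) e.2.1 e.2.2] =
      List.map (fun k => pvFoldSt (List.take k (es ++ [e]))) (List.range (es.length + 1)) ++
        List.map (fun k => pvFoldSt (List.take k (es ++ [e]))) [es.length + 1]
    congr 1
    · apply List.map_congr_left
      intro k hk
      rw [List.mem_range] at hk
      rw [List.take_append_of_le_length (by omega)]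
    · simp only [List.map_cons, List.map_nil]
      rw [List.take_of_length_le (by simp), h1]

-- sorted prefix below the threshold = filter
theorem take_countP_eq_filter (t : Int) (l : List (Int × Int × Int))
    (hs : l.Pairwise (fun a b => a.1 ≤ b.1)) :
    l.take (l.countP (fun e => decide (e.1 < t))) = l.filter (fun e => decide (e.1 < t)) := by
  induction l with
  | nil => simp
  | cons e l ih =>
    rw [List.pairwise_cons] at hs
    by_cases he : e.1 < t
    · rw [List.filter_cons_of_pos (by simpa using he)]
      simp only [List.countP_cons, decide_eq_true_eq, he, if_true, List.take_succ_cons]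
      rw [ih hs.2]
    · rw [List.filter_cons_of_neg (by simpa using he)]
      simp only [List.countP_cons, decide_eq_true_eq, he, if_false]
      have hz : l.countP (fun e => decide (e.1 < t)) = 0 := by
        apply List.countP_eq_zero.mpr
        intro f hf
        simp only [decide_eq_true_eq, not_lt]
        have := hs.1 f hf
        omega
      have hz2 : l.filter (fun e => decide (e.1 < t)) = [] := by
        apply List.filter_eq_nil_iff.mpr
        intro f hf
        simp only [decide_eq_true_eq, not_lt]
        have := hs.1 f hf
        omega
      rw [hz, hz2, List.take_zero]

-- master lemma: a query against the built index answers the existential over the raw group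
theorem pvQuery_build (g : List (Int × Int × Int)) (t bound q : Int) :
    pvQuery (pvBuild g) t bound q = true ↔
      ∃ e ∈ g, e.2.2 ≠ q ∧ e.1 < t ∧ e.2.1 > bound := by
  have h1 : pvBuild g = ((PySem.List.sorted g (fun e => e.1) false).map (fun e => e.1),
      (List.range ((PySem.List.sorted g (fun e => e.1) false).length + 1)).map
        (fun k => pvFoldSt ((PySem.List.sorted g (fun e => e.1) false).take k))) := by
    simp only [pvBuild]
    rw [pvBuild_scan]
  rw [pvQuery_eq_qdec, h1]
  simp only
  have hcount : pvCountLess ((PySem.List.sorted g (fun e => e.1) false).map (fun e => e.1)) t =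
      (PySem.List.sorted g (fun e => e.1) false).countP (fun e => decide (e.1 < t)) := by
    rw [pvCountLess_eq_countP _ _ (PySem.List.sorted_map_key_pairwise g (fun e => e.1)),
      List.countP_map]
    rfl
  rw [hcount]
  have hk : (PySem.List.sorted g (fun e => e.1) false).countP (fun e => decide (e.1 < t)) ≤
      (PySem.List.sorted g (fun e => e.1) false).length := List.countP_le_length
  rw [List.getD_eq_getElem _ _ (by simpa using Nat.lt_succ_of_le hk)]
  rw [List.getElem_map, List.getElem_range]
  rw [pvQuery_state _ _ _ _ (pvInv_foldSt _)]
  rw [take_countP_eq_filter _ _ (PySem.List.sorted_pairwise g (fun e => e.1))]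
  constructor
  · rintro ⟨e, he, hq, hv⟩
    rw [List.mem_filter] at he
    exact ⟨e, (PySem.List.mem_sorted _ _ _ _).mp he.1, hq, by simpa using he.2, hv⟩
  · rintro ⟨e, he, hq, ht, hv⟩
    exact ⟨e, List.mem_filter.mpr ⟨(PySem.List.mem_sorted _ _ _ _).mpr he, by simpa using ht⟩, hq, hv⟩

theorem if_nest_collapse {P Q : Prop} [Decidable P] [Decidable Q] (a b : Int) :
    (if P then (if Q then a else b) else b) = if P ∧ Q then a else b := by
  by_cases hP : P <;> by_cases hQ : Q <;> simp [hP, hQ]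

-- a fold inserting a value per distinct key, looked up at one of the keys
theorem dictOfKeys_getD {β : Type} (keys : List String) (hk : keys.Nodup)
    (f : String → β) (c : String) (hc : c ∈ keys) (d0 : β) :
    (keys.foldl (fun d c => d.insert c (f c)) PySem.Dict.empty).getD c d0 = f c := by
  have hitems := PySem.Dict.items_foldl_insert_fresh keys (fun c => c) f PySem.Dict.empty
    (by intro a _; simp) (by simpa using hk)
  have hnd : (keys.foldl (fun d c => d.insert c (f c)) PySem.Dict.empty).keys.Nodup := by
    exact PySem.Dict.nodup_keys_foldl_insert keys (fun _ c => f c) PySem.Dict.empty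
      PySem.Dict.nodup_keys_empty
  apply PySem.Dict.getD_of_mem_items _ _ hnd
  rw [hitems]
  exact List.mem_append_right _ (List.mem_map_of_mem hc)

-- existentials over the projected same-chromosome sublist
theorem exists_group {α : Type} (bed : List (String × Int × Int × Int)) (c : String)
    (f : (String × Int × Int × Int) → α) (P : α → Prop) :
    (∃ e ∈ (bed.filter (fun y => y.1 == c)).map f, P e) ↔ ∃ y ∈ bed, y.1 = c ∧ P (f y) := by
  constructor
  · rintro ⟨e, he, hP⟩
    obtain ⟨y, hy, rfl⟩ := List.mem_map.mp he
    rw [List.mem_filter] at hy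
    exact ⟨y, hy.1, by simpa using hy.2, hP⟩
  · rintro ⟨y, hy, hc, hP⟩
    exact ⟨f y, List.mem_map_of_mem (List.mem_filter.mpr ⟨hy, by simpa using hc⟩), hP⟩

theorem numEligibleDeletions_spec_aux (mnLen mxLen rLen : Int)
    (bedEntries : List (String × Int × Int × Int)) :
    numEligibleDeletions mnLen mxLen rLen bedEntries =
      numEligibleDeletions_alt mnLen mxLen rLen bedEntries := by
  have hnodupK : (bedEntries.foldl (fun d x => d.modify x.1 []
      (· ++ [(x.2.1, x.2.2.1, x.2.2.2)])) PySem.Dict.empty).keys.Nodup :=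
    PySem.Dict.nodup_keys_foldl_modify_key bedEntries (fun x => x.1) []
      (fun _ x => (· ++ [(x.2.1, x.2.2.1, x.2.2.2)])) PySem.Dict.empty PySem.Dict.nodup_keys_empty
  have hmemK : ∀ x ∈ bedEntries, x.1 ∈ (bedEntries.foldl (fun d x => d.modify x.1 []
      (· ++ [(x.2.1, x.2.2.1, x.2.2.2)])) PySem.Dict.empty).keys := by
    intro x hx
    rw [PySem.Dict.keys_foldl_modify_key bedEntries (fun x => x.1) []
      (fun _ x => (· ++ [(x.2.1, x.2.2.1, x.2.2.2)])) PySem.Dict.empty]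
    rw [PySem.Set.mem_update]
    exact Or.inr (List.mem_map_of_mem hx)
  simp only [numEligibleDeletions, numEligibleDeletions_alt]
  set G := bedEntries.foldl (fun d x => d.modify x.1 []
      (· ++ [(x.2.1, x.2.2.1, x.2.2.2)])) PySem.Dict.empty with hG
  have hGgetD : ∀ c, G.getD c [] =
      (bedEntries.filter (fun y => y.1 == c)).map (fun y => (y.2.1, y.2.2.1, y.2.2.2)) := by
    intro c
    rw [hG]
    exact groups_getD bedEntries c
  rw [PySem.List.foldl_prod_mk
    (fun (d : PySem.Dict String (List Int × List PvSt)) c => d.insert c (pvBuild (G.getD c [])))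
    (fun (d : PySem.Dict String (List Int × List PvSt)) c =>
      d.insert c (pvBuild ((G.getD c []).map (fun e => (-e.1, -e.2.1, e.2.2)))))
    G.keys PySem.Dict.empty PySem.Dict.empty]
  apply PySem.List.foldl_congr_mem
  intro acc x hx
  rw [containsNestedA_char, isNestedA_char]
  rw [dictOfKeys_getD _ hnodupK _ _ (hmemK x hx), dictOfKeys_getD _ hnodupK _ _ (hmemK x hx),
    hGgetD, List.map_map]
  have hQ1 : ∀ (t bound : Int),
      pvQuery (pvBuild ((bedEntries.filter (fun y => y.1 == x.1)).map
        (fun y => (y.2.1, y.2.2.1, y.2.2.2)))) t bound x.2.2.2 = true ↔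
      ∃ y ∈ bedEntries, y.1 = x.1 ∧ y.2.2.2 ≠ x.2.2.2 ∧ y.2.1 < t ∧ y.2.2.1 > bound := by
    intro t bound
    exact (pvQuery_build _ _ _ _).trans (exists_group bedEntries x.1
      (fun y => (y.2.1, y.2.2.1, y.2.2.2)) (fun e => e.2.2 ≠ x.2.2.2 ∧ e.1 < t ∧ e.2.1 > bound))
  have hQ3 : ∀ (t bound : Int),
      pvQuery (pvBuild ((bedEntries.filter (fun y => y.1 == x.1)).map
        ((fun e => (-e.1, -e.2.1, e.2.2)) ∘ (fun y => (y.2.1, y.2.2.1, y.2.2.2))))) t bound x.2.2.2 = true ↔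
      ∃ y ∈ bedEntries, y.1 = x.1 ∧ y.2.2.2 ≠ x.2.2.2 ∧ -y.2.1 < t ∧ -y.2.2.1 > bound := by
    intro t bound
    exact (pvQuery_build _ _ _ _).trans (exists_group bedEntries x.1
      ((fun e => (-e.1, -e.2.1, e.2.2)) ∘ (fun y => (y.2.1, y.2.2.1, y.2.2.2)))
      (fun e => e.2.2 ≠ x.2.2.2 ∧ e.1 < t ∧ e.2.1 > bound))
  have hiff : (mxLen > x.2.2.1 - x.2.1 ∧ x.2.2.1 - x.2.1 ≥ mnLen ∧
      (if bedEntries.any (fun y => decide (x.2.2.2 ≠ y.2.2.2 ∧ x.1 = y.1 ∧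
          x.2.1 - rLen < y.2.1 ∧ y.2.2.1 < x.2.2.1 + rLen)) then (1 : Int) else 0) = 0 ∧
      (if bedEntries.any (fun y => decide (x.2.2.2 ≠ y.2.2.2 ∧ x.1 = y.1 ∧
          ((y.2.1 - rLen < x.2.1 ∧ x.2.2.1 < y.2.2.1 + rLen) ∨
           (y.2.1 - rLen < x.2.1 ∧ x.2.1 < y.2.2.1 + rLen) ∨
           (y.2.1 - rLen < x.2.2.1 ∧ x.2.2.1 < y.2.2.1 + rLen)))) then (1 : Int) else 0) = 0) ↔
      ((mnLen ≤ x.2.2.1 - x.2.1 ∧ x.2.2.1 - x.2.1 < mxLen) ∧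
        ¬ ((pvQuery (pvBuild ((bedEntries.filter (fun y => y.1 == x.1)).map
              (fun y => (y.2.1, y.2.2.1, y.2.2.2)))) (x.2.1 + rLen) (min x.2.1 x.2.2.1 - rLen) x.2.2.2
          || pvQuery (pvBuild ((bedEntries.filter (fun y => y.1 == x.1)).map
              (fun y => (y.2.1, y.2.2.1, y.2.2.2)))) (x.2.2.1 + rLen) (x.2.2.1 - rLen) x.2.2.2
          || pvQuery (pvBuild ((bedEntries.filter (fun y => y.1 == x.1)).map
              ((fun e => (-e.1, -e.2.1, e.2.2)) ∘ (fun y => (y.2.1, y.2.2.1, y.2.2.2)))))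
              (rLen - x.2.1) (-x.2.2.1 - rLen) x.2.2.2) = true)) := by
    rw [pvIndicator, pvIndicator, Bool.or_eq_true, Bool.or_eq_true]
    rw [List.any_eq_false, List.any_eq_false]
    constructor
    · rintro ⟨hmx, hmn, h4, h123⟩
      refine ⟨⟨hmn, hmx⟩, ?_⟩
      rintro ((hq | hq) | hq)
      · rw [hQ1] at hq
        obtain ⟨y, hy, hc, hid, ha1, ha2⟩ := hq
        have hh := h123 y hy
        simp only [decide_eq_true_eq] at hh
        exact hh ⟨fun hc2 => hid hc2.symm, hc.symm, by omega⟩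
      · rw [hQ1] at hq
        obtain ⟨y, hy, hc, hid, ha1, ha2⟩ := hq
        have hh := h123 y hy
        simp only [decide_eq_true_eq] at hh
        exact hh ⟨fun hc2 => hid hc2.symm, hc.symm, by omega⟩
      · rw [hQ3] at hq
        obtain ⟨y, hy, hc, hid, ha1, ha2⟩ := hq
        have hh := h4 y hy
        simp only [decide_eq_true_eq] at hh
        exact hh ⟨fun hc2 => hid hc2.symm, hc.symm, by omega⟩
    · rintro ⟨⟨hmn, hmx⟩, hq⟩
      refine ⟨hmx, hmn, ?_, ?_⟩
      · intro y hy
        simp only [decide_eq_true_eq]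
        rintro ⟨hid, hc, har⟩
        exact hq (Or.inr ((hQ3 _ _).mpr
          ⟨y, hy, hc.symm, fun hc2 => hid hc2.symm, by omega, by omega⟩))
      · intro y hy
        simp only [decide_eq_true_eq]
        rintro ⟨hid, hc, (har | har | har)⟩
        · exact hq (Or.inl (Or.inl ((hQ1 _ _).mpr
            ⟨y, hy, hc.symm, fun hc2 => hid hc2.symm, by omega, by omega⟩)))
        · exact hq (Or.inl (Or.inl ((hQ1 _ _).mpr
            ⟨y, hy, hc.symm, fun hc2 => hid hc2.symm, by omega, by omega⟩)))
        · exact hq (Or.inl (Or.inr ((hQ1 _ _).mpr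
            ⟨y, hy, hc.symm, fun hc2 => hid hc2.symm, by omega, by omega⟩)))
  rw [if_nest_collapse]
  exact if_congr hiff rfl rfl

-- ===== VERDICT (by name: the statement is the Claim_ definition above) =====
theorem numEligibleDeletions_spec : Claim_equal_numEligibleDeletions := by
  intro mnLen mxLen rLen bedEntries _
  exact numEligibleDeletions_spec_aux mnLen mxLen rLen bedEntries
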